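-- pv_equiv track=rewrite | github.com/adiseal/edabit-practices | List Index.py | list_index
-- ===== SOURCE A (Python) =====
-- def list_index(lst, idx):
-- 	count = 0
-- 	a = ""
-- 	for i in lst:
-- 		for k in i:
-- 			count = count +1
-- 			for j in idx:
-- 				if j == count:
-- 					a = a+ k
-- 	return a
-- ===== SOURCE B (Python) =====
-- def list_index(lst, idx):
--     s = [c for w in lst for c in w]
--     return ''.join(s[j - 1] for j in sorted(idx) if 1 <= j <= len(s))
-- ===== Notes on version B (the rewrite author's own statement) =====
-- stated objective: faster
-- what changed: Replaced A's triple nested loop (for every character of every string, rescan all of idx) by building the flattened character list once and doing a single pass over sorted(idx) with a range guard, which yields the same order because A emits characters in increasing position order with idx-multiplicity.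
import Mathlib
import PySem

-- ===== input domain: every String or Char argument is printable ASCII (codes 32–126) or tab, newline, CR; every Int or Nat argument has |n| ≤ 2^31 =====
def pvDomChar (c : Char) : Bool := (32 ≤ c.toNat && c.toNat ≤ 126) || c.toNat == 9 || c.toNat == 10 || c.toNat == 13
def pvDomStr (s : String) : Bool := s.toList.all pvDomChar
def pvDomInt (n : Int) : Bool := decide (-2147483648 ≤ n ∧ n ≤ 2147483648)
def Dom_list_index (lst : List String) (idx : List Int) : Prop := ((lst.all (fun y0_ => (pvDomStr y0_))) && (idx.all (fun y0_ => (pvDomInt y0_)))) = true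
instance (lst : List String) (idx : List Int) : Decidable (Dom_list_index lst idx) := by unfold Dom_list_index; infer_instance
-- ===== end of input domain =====

-- B builds the flattened character list once and does one pass over sorted(idx),
-- replacing A's per-character rescan of idx; same return value is proved below.

-- ===== PORT A =====
def list_index (lst : List String) (idx : List Int) : String :=
  (lst.foldl (fun (st : Int × String) i =>
      i.toList.foldl (fun (st : Int × String) k =>
        let count := st.1 + 1
        (count, idx.foldl (fun a j => if j == count then a.push k else a) st.2)) st)
    (0, "")).2

-- ===== PORT B =====
def list_index_alt (lst : List String) (idx : List Int) : String :=
  let s : List Char := lst.flatMap (fun w => w.toList)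
  String.ofList ((PySem.List.sorted idx (fun x => x) false).filterMap
    (fun j => if 1 ≤ j ∧ j ≤ (s.length : Int) then PySem.List.pyGet? s (j - 1) else none))

-- ===== PRECONDITION & SPEC =====
def Spec_list_index (lst : List String) (idx : List Int) (out : String) : Prop := out = list_index_alt lst idx
instance (lst : List String) (idx : List Int) (out : String) : Decidable (Spec_list_index lst idx out) := by unfold Spec_list_index; infer_instance

-- ===== CLAIM (what is proved, stated in full; the proofs are below) =====
def Claim_equal_list_index : Prop := ∀ (lst : List String) (idx : List Int), Dom_list_index lst idx → Spec_list_index lst idx (list_index lst idx)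

-- ===== LEMMAS AND PROOFS =====

-- canonical result: for each flattened character, its position's multiplicity in idx
def specChars (idx : List Int) : List Char → Int → List Char
  | [], _ => []
  | k :: cs, c => List.replicate (idx.count (c + 1)) k ++ specChars idx cs (c + 1)

-- the positions c+1 .. c+n, each repeated by its multiplicity in idx, in order
def posL (idx : List Int) : Nat → Nat → List Int
  | 0, _ => []
  | n + 1, c => List.replicate (idx.count ((c : Int) + 1)) ((c : Int) + 1) ++ posL idx n (c + 1)

lemma inner_fold (idx : List Int) (count : Int) (k : Char) :
    ∀ a : String,
      (idx.foldl (fun a j => if j == count then a.push k else a) a).toList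
        = a.toList ++ List.replicate (idx.count count) k := by
  induction idx with
  | nil => intro a; simp
  | cons j t ih =>
    intro a
    simp only [List.foldl_cons]
    by_cases h : j = count
    · subst h
      have he : (if (j == j) = true then a.push k else a) = a.push k := by simp
      rw [he, ih, List.count_cons_self, List.replicate_succ]
      simp
    · have hb : (j == count) = false := by simpa using h
      rw [hb]
      simp only [Bool.false_eq_true, if_false, ih]
      rw [List.count_cons_of_ne h]

lemma char_loop (idx : List Int) :
    ∀ (cs : List Char) (c : Int) (a : String),
      cs.foldl (fun (st : Int × String) k =>
          let count := st.1 + 1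
          (count, idx.foldl (fun a j => if j == count then a.push k else a) st.2)) (c, a)
        = (c + cs.length, String.ofList (a.toList ++ specChars idx cs c)) := by
  intro cs
  induction cs with
  | nil => intro c a; simp [specChars]
  | cons k cs ih =>
    intro c a
    simp only [List.foldl_cons]
    rw [ih (c + 1)]
    refine Prod.ext ?_ ?_
    · simp; ring
    · simp only [specChars]
      rw [inner_fold idx (c + 1) k a]
      simp [List.append_assoc]

lemma count_posL (idx : List Int) :
    ∀ (n c : Nat) (v : Int),
      (posL idx n c).count v
        = if (c : Int) < v ∧ v ≤ (c : Int) + n then idx.count v else 0 := by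
  intro n
  induction n with
  | zero =>
    intro c v
    simp only [posL, List.count_nil, Nat.cast_zero]
    rw [if_neg (by omega)]
  | succ n ih =>
    intro c v
    simp only [posL, List.count_append, ih, List.count_replicate]
    rcases eq_or_ne ((c : Int) + 1) v with h | h
    · subst h
      rw [if_pos (beq_self_eq_true _)]
      split_ifs <;> push_cast at * <;> omega
    · rw [if_neg (by simp [h])]
      split_ifs <;> push_cast at * <;> omega

lemma mem_posL (idx : List Int) (n c : Nat) (v : Int) (h : v ∈ posL idx n c) :
    (c : Int) < v ∧ v ≤ (c : Int) + n := by
  by_contra hc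
  have h1 := count_posL idx n c v
  rw [if_neg hc] at h1
  have := List.count_pos_iff.mpr h
  omega

lemma pairwise_posL (idx : List Int) :
    ∀ (n c : Nat), (posL idx n c).Pairwise (· ≤ ·) := by
  intro n
  induction n with
  | zero => intro c; simp [posL]
  | succ n ih =>
    intro c
    simp only [posL]
    refine List.pairwise_append.mpr ⟨List.pairwise_replicate.mpr (by simp), ih (c + 1), ?_⟩
    intro a ha b hb
    have ha' := List.eq_of_mem_replicate ha
    have hb' := (mem_posL idx n (c + 1) b hb).1
    subst ha'
    push_cast at hb' ⊢
    omega

lemma posL_perm_filter (idx : List Int) (N : Nat) :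
    (posL idx N 0).Perm (idx.filter (fun j => decide (1 ≤ j) && decide (j ≤ (N : Int)))) := by
  rw [List.perm_iff_count]
  intro v
  rw [count_posL]
  simp only [Nat.cast_zero, zero_add]
  by_cases h : (0 : Int) < v ∧ v ≤ (N : Int)
  · rw [if_pos h, List.count_filter (by simp; omega)]
  · rw [if_neg h]
    symm
    rw [List.count_eq_zero]
    intro hm
    have := (List.mem_filter.mp hm).2
    simp at this
    omega

lemma filter_sorted_eq_posL (idx : List Int) (N : Nat) :
    ((PySem.List.sorted idx (fun x => x) false).filter
        (fun j => decide (1 ≤ j) && decide (j ≤ (N : Int)))) = posL idx N 0 := by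
  set p : Int → Bool := fun j => decide (1 ≤ j) && decide (j ≤ (N : Int)) with hp
  have h1 : PySem.List.sorted (idx.filter p) (fun x => x) false
      = (PySem.List.sorted idx (fun x => x) false).filter p := by
    apply PySem.List.sorted_id_eq_of_perm_of_pairwise
    · exact (PySem.List.sorted_perm ..).filter p
    · exact List.Pairwise.filter p (by simpa using PySem.List.sorted_pairwise (xs := idx) (key := fun x => x))
  have h2 : PySem.List.sorted (idx.filter p) (fun x => x) false = posL idx N 0 := by
    apply PySem.List.sorted_id_eq_of_perm_of_pairwise
    · exact posL_perm_filter idx N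
    · exact pairwise_posL idx N 0
  rw [← h1, h2]

lemma filterMap_eq_map_filter (s : List Char) :
    ∀ l : List Int,
      l.filterMap (fun j => if 1 ≤ j ∧ j ≤ (s.length : Int) then PySem.List.pyGet? s (j - 1) else none)
        = (l.filter (fun j => decide (1 ≤ j) && decide (j ≤ (s.length : Int)))).map
            (fun j => (PySem.List.pyGet? s (j - 1)).getD 'a') := by
  intro l
  induction l with
  | nil => simp
  | cons j t ih =>
    by_cases h : 1 ≤ j ∧ j ≤ (s.length : Int)
    · have hk : (j - 1).toNat < s.length := by omega
      have hg : PySem.List.pyGet? s (j - 1) = some s[(j - 1).toNat] := by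
        conv_lhs => rw [show (j - 1) = (((j - 1).toNat : Nat) : Int) from by omega]
        rw [PySem.List.pyGet?_natCast]
        simp
      have hb : (decide (1 ≤ j) && decide (j ≤ (s.length : Int))) = true := by
        simp [h.1, h.2]
      simp only [List.filterMap_cons, List.filter_cons, if_pos h, hb, if_true, hg, List.map_cons]
      simp [ih]
    · have hb : (decide (1 ≤ j) && decide (j ≤ (s.length : Int))) = false := by
        simp only [Bool.and_eq_false_iff, decide_eq_false_iff_not]
        by_cases h1 : 1 ≤ j
        · right; intro h2; exact h ⟨h1, h2⟩
        · left; exact h1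
      simp only [List.filterMap_cons, List.filter_cons, if_neg h, hb]
      simp [ih]

lemma map_posL (s : List Char) (idx : List Int) :
    ∀ (n c : Nat), c + n = s.length →
      (posL idx n c).map (fun j => (PySem.List.pyGet? s (j - 1)).getD 'a')
        = specChars idx (s.drop c) (c : Int) := by
  intro n
  induction n with
  | zero =>
    intro c h
    have hd : s.drop c = [] := List.drop_of_length_le (by omega)
    rw [hd]
    simp [posL, specChars]
  | succ n ih =>
    intro c h
    have hc : c < s.length := by omega
    have hdrop : s.drop c = s[c] :: s.drop (c + 1) := List.drop_eq_getElem_cons hc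
    have hg : PySem.List.pyGet? s ((c : Int) + 1 - 1) = some s[c] := by
      have he : (c : Int) + 1 - 1 = ((c : Nat) : Int) := by omega
      rw [he, PySem.List.pyGet?_natCast]
      simp [hc]
    simp only [posL, List.map_append, List.map_replicate, hg, Option.getD_some]
    rw [ih (c + 1) (by omega), hdrop]
    simp only [specChars, Nat.cast_add, Nat.cast_one]

lemma flatMap_fold (lst : List String) (idx : List Int) :
    ∀ (st : Int × String),
      lst.foldl (fun (st : Int × String) i =>
          i.toList.foldl (fun (st : Int × String) k =>
            let count := st.1 + 1
            (count, idx.foldl (fun a j => if j == count then a.push k else a) st.2)) st) st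
        = (lst.flatMap (fun w => w.toList)).foldl (fun (st : Int × String) k =>
            let count := st.1 + 1
            (count, idx.foldl (fun a j => if j == count then a.push k else a) st.2)) st := by
  induction lst with
  | nil => intro st; simp
  | cons w ws ih => intro st; simp only [List.foldl_cons, List.flatMap_cons, List.foldl_append, ih]

-- ===== VERDICT (by name: the statement is the Claim_ definition above) =====
theorem list_index_spec : Claim_equal_list_index := by
  intro lst idx _
  unfold Spec_list_index list_index
  simp only [list_index_alt]
  rw [flatMap_fold]
  set s : List Char := lst.flatMap (fun w => w.toList) with hs
  rw [char_loop idx s 0 ""]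
  rw [filterMap_eq_map_filter s, filter_sorted_eq_posL idx s.length,
      map_posL s idx s.length 0 (by omega)]
  simp
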